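-- pv_equiv track=rewrite | github.com/ForeignGods/ComfyUI-Mana-Nodes | nodes/font2img_node.py | parse_text_input
-- ===== SOURCE A (Python) =====
-- def parse_text_input(text, kwargs):
--     structured_format = False
--     frame_text_dict = {}
--     frame_count = kwargs['frame_count']
--
--     # Filter out empty lines
--     lines = [line for line in text.split('\n') if line.strip()]
--
--     # Check if the input is in the structured format
--     if all(':' in line and line.split(':')[0].strip().replace('"', '').isdigit() for line in lines):
--         structured_format = True
--         for line in lines:
--             parts = line.split(':', 1)
--             if len(parts) == 2:
--                 frame_number = parts[0].strip().replace('"', '')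
--                 text = parts[1].strip().replace('"', '').replace(',', '')
--                 frame_text_dict[frame_number] = text
--     else:
--         # If not in structured format, use the input text for all frames
--         frame_text_dict = {str(i): text for i in range(1, frame_count + 1)}
--
--     return frame_text_dict, structured_format
-- ===== SOURCE B (Python) =====
-- def parse_text_input(text, kwargs):
--     frame_count = kwargs['frame_count']
--     frame_text_dict = {}
--     structured_format = True
--     for line in text.split('\n'):
--         if not line.strip():
--             continue
--         parts = line.split(':', 1)
--         frame_number = parts[0].strip().replace('"', '')
--         if len(parts) == 2 and frame_number.isdigit():
--             frame_text_dict[frame_number] = parts[1].strip().replace('"', '').replace(',', '')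
--         else:
--             structured_format = False
--             break
--     if not structured_format:
--         frame_text_dict = {str(i): text for i in range(1, frame_count + 1)}
--     return frame_text_dict, structured_format
-- ===== Notes on version B (the rewrite author's own statement) =====
-- stated objective: alternative
-- what changed: Replaces A's two-phase design (an all() structured-format check over every line followed by a separate rebuild loop) with a single linear pass that parses each non-blank line as it goes and breaks to the fallback on the first non-structured line.
-- outside the precondition, e.g. on parse_text_input('1: a', {}): A raises KeyError, B raises KeyError
import Mathlib
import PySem

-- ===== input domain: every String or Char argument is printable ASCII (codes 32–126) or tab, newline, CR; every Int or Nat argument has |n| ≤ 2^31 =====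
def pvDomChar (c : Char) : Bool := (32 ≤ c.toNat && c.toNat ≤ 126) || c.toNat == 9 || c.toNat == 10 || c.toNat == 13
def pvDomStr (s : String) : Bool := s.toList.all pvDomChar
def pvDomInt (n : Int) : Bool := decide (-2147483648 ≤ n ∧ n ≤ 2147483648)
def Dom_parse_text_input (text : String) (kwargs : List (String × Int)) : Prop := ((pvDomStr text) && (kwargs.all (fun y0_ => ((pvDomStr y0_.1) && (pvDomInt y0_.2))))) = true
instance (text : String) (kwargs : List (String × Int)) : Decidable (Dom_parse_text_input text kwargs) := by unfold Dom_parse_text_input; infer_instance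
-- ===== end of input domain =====

-- B replaces A's two-phase all()-check-then-rebuild with one linear pass that breaks on the
-- first non-structured line (objective: alternative decomposition; same asymptotic cost).


-- shared helpers (the same sub-expressions occur verbatim in both Pythons)
-- kwargs['frame_count'] : first-match lookup in the association list (dict convention)
def pvFrameCount (kwargs : List (String × Int)) : Int :=
  ((kwargs.find? (fun p => p.1 == "frame_count")).map (fun p => p.2)).getD 0
-- parts[0].strip().replace('"', '')
def pvCleanKey (s : String) : String := PySem.Str.replace (PySem.Str.strip s) "\"" ""
-- parts[1].strip().replace('"', '').replace(',', '')
def pvCleanVal (s : String) : String :=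
  PySem.Str.replace (PySem.Str.replace (PySem.Str.strip s) "\"" "") "," ""
-- {str(i): text for i in range(1, frame_count + 1)} (identical comprehension in A and B)
def pvFallback (text : String) (fc : Int) : List (String × String) :=
  ((PySem.List.pyRange 1 (fc + 1) 1).foldl
    (fun d i => PySem.Dict.insert d (PySem.Int.toStr i) text)
    (PySem.Dict.empty : PySem.Dict String String)).items

-- ===== PORT A =====
-- ':' in line and line.split(':')[0].strip().replace('"','').isdigit()
def pvCheckA (line : String) : Bool :=
  PySem.Str.isIn ":" line &&
    PySem.Str.strIsdigit (pvCleanKey (((PySem.Str.split? line ":").getD []).headD ""))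

-- one iteration of A's structured build loop
def pvStepA (d : PySem.Dict String String) (line : String) : PySem.Dict String String :=
  let parts := (PySem.Str.splitMax? line ":" 1).getD []
  if parts.length == 2 then
    PySem.Dict.insert d (pvCleanKey (parts.headD "")) (pvCleanVal (parts.getD 1 ""))
  else d

def parse_text_input (text : String) (kwargs : List (String × Int)) : (List (String × String)) × Bool :=
  let frame_count := pvFrameCount kwargs
  let lines := ((PySem.Str.split? text "\n").getD []).filter (fun l => PySem.Str.strip l != "")
  if lines.all pvCheckA then
    ((lines.foldl pvStepA (PySem.Dict.empty : PySem.Dict String String)).items, true)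
  else
    (pvFallback text frame_count, false)

-- ===== PORT B =====
-- B's single pass: skip blank lines, add structured lines, break on the first failure
def pvLoopB : PySem.Dict String String → List String → PySem.Dict String String × Bool
  | d, [] => (d, true)
  | d, line :: rest =>
    if PySem.Str.strip line == "" then pvLoopB d rest
    else
      let parts := (PySem.Str.splitMax? line ":" 1).getD []
      let frame_number := pvCleanKey (parts.headD "")
      if parts.length == 2 && PySem.Str.strIsdigit frame_number then
        pvLoopB (PySem.Dict.insert d frame_number (pvCleanVal (parts.getD 1 ""))) rest
      else (d, false)

def parse_text_input_alt (text : String) (kwargs : List (String × Int)) : (List (String × String)) × Bool :=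
  let frame_count := pvFrameCount kwargs
  match pvLoopB PySem.Dict.empty ((PySem.Str.split? text "\n").getD []) with
  | (d, true) => (d.items, true)
  | (_, false) => (pvFallback text frame_count, false)

-- ===== PRECONDITION & SPEC =====
-- Pre_ excludes exactly the inputs where kwargs has no 'frame_count' key: there A (and B) raise KeyError.
def Pre_parse_text_input (text : String) (kwargs : List (String × Int)) : Prop :=
  "frame_count" ∈ kwargs.map Prod.fst
instance (text : String) (kwargs : List (String × Int)) : Decidable (Pre_parse_text_input text kwargs) := by unfold Pre_parse_text_input; infer_instance

def pvWitness_parse_text_input : String × (List (String × Int)) :=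
  ("1: hello\n2: world", [("frame_count", 2)])

def Spec_parse_text_input (text : String) (kwargs : List (String × Int)) (out : (List (String × String)) × Bool) : Prop := out = parse_text_input_alt text kwargs
instance (text : String) (kwargs : List (String × Int)) (out : (List (String × String)) × Bool) : Decidable (Spec_parse_text_input text kwargs out) := by unfold Spec_parse_text_input; infer_instance

-- ===== CLAIM (what is proved, stated in full; the proofs are below) =====
def Claim_equal_parse_text_input : Prop := ∀ (text : String) (kwargs : List (String × Int)), Dom_parse_text_input text kwargs → Pre_parse_text_input text kwargs → Spec_parse_text_input text kwargs (parse_text_input text kwargs)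

-- ===== LEMMAS AND PROOFS =====

-- reference full split on ':' by plain structural recursion
def pvSplitColon : List Char → List (List Char)
  | [] => [[]]
  | c :: rest =>
    if c = ':' then [] :: pvSplitColon rest
    else
      match pvSplitColon rest with
      | [] => [[c]]
      | p :: ps => (c :: p) :: ps

def pvModHead (cur : List Char) : List (List Char) → List (List Char)
  | [] => [cur.reverse]
  | p :: ps => (cur.reverse ++ p) :: ps

lemma pvSplitColon_ne_nil (l : List Char) : pvSplitColon l ≠ [] := by
  cases l with
  | nil => simp [pvSplitColon]
  | cons c rest =>
    simp only [pvSplitColon]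
    split
    · simp
    · cases h : pvSplitColon rest <;> simp

-- splitOn.go characterised by pvSplitColon
lemma pvSplitOn_go_eq (l : List Char) : ∀ (fuel : Nat) (cur : List Char) (acc : List (List Char)),
    l.length ≤ fuel →
    PySem.Chars.splitOn.go [':'] fuel l cur acc = acc.reverse ++ pvModHead cur (pvSplitColon l) := by
  induction l with
  | nil =>
    intro fuel cur acc _
    cases fuel <;> simp [PySem.Chars.splitOn.go, pvSplitColon, pvModHead]
  | cons c rest ih =>
    intro fuel cur acc hf
    cases fuel with
    | zero => simp at hf
    | succ f =>
      simp only [PySem.Chars.splitOn.go]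
      by_cases hc : c = ':'
      · subst hc
        have hp : [':'].isPrefixOf (':' :: rest) = true := by simp [List.isPrefixOf]
        rw [if_pos hp]
        simp only [List.length_cons] at hf
        rw [show List.drop [':'].length (':' :: rest) = rest from rfl]
        rw [ih f [] (cur.reverse :: acc) (by omega)]
        rcases h : pvSplitColon rest with _ | ⟨p, ps⟩
        · exact absurd h (pvSplitColon_ne_nil rest)
        · simp [pvSplitColon, pvModHead, h]
      · have hp : [':'].isPrefixOf (c :: rest) = false := by
          simp [List.isPrefixOf]; exact fun h => absurd h.symm hc
        rw [if_neg (by simp [hp])]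
        simp only [List.length_cons] at hf
        rw [ih f (c :: cur) acc (by omega)]
        rcases h : pvSplitColon rest with _ | ⟨p, ps⟩
        · exact absurd h (pvSplitColon_ne_nil rest)
        · simp [pvSplitColon, pvModHead, h, hc]

lemma pvSplitOn_eq (l : List Char) : PySem.Chars.splitOn l [':'] = pvSplitColon l := by
  unfold PySem.Chars.splitOn
  rw [pvSplitOn_go_eq l (l.length + 1) [] [] (by omega)]
  rcases h : pvSplitColon l with _ | ⟨p, ps⟩
  · exact absurd h (pvSplitColon_ne_nil l)
  · simp [pvModHead]

-- splitOnMax.go with maxsplit exhausted returns the remainder as one piece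
lemma pvGoMax0 (fuel : Nat) (l cur : List Char) (acc : List (List Char)) :
    PySem.Chars.splitOnMax.go [':'] fuel 0 l cur acc = ((cur.reverse ++ l) :: acc).reverse := by
  cases fuel <;> cases l <;> simp [PySem.Chars.splitOnMax.go]

-- splitOnMax.go with maxsplit 1: split at the first ':' only
lemma pvGoMax1 (l : List Char) : ∀ (fuel : Nat) (cur : List Char) (acc : List (List Char)),
    l.length ≤ fuel →
    PySem.Chars.splitOnMax.go [':'] fuel 1 l cur acc =
      acc.reverse ++ (if ':' ∈ l then
        [cur.reverse ++ l.takeWhile (· != ':'), (l.dropWhile (· != ':')).tail]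
      else [cur.reverse ++ l]) := by
  induction l with
  | nil =>
    intro fuel cur acc _
    cases fuel <;> simp [PySem.Chars.splitOnMax.go]
  | cons c rest ih =>
    intro fuel cur acc hf
    cases fuel with
    | zero => simp at hf
    | succ f =>
      simp only [PySem.Chars.splitOnMax.go]
      by_cases hc : c = ':'
      · subst hc
        have hp : [':'].isPrefixOf (':' :: rest) = true := by simp [List.isPrefixOf]
        rw [if_neg (by omega), if_pos hp]
        rw [pvGoMax0]
        simp [List.takeWhile, List.dropWhile]
      · have hp : [':'].isPrefixOf (c :: rest) = false := by
          simp [List.isPrefixOf]; exact fun h => absurd h.symm hc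
        rw [if_neg (by omega), if_neg (by simp [hp])]
        simp only [List.length_cons] at hf
        rw [ih f (c :: cur) acc (by omega)]
        simp only [List.mem_cons, List.takeWhile, List.dropWhile]
        have hne : (c != ':') = true := by simp [hc]
        rw [hne]
        by_cases hm : ':' ∈ rest <;> simp [hm, Ne.symm hc]

lemma pvSplitMax1_eq (l : List Char) : PySem.Chars.splitOnMax l [':'] 1 =
    if ':' ∈ l then [l.takeWhile (· != ':'), (l.dropWhile (· != ':')).tail] else [l] := by
  unfold PySem.Chars.splitOnMax
  rw [if_neg (by omega)]
  rw [show (1:Int).toNat = 1 from rfl]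
  rw [pvGoMax1 l (l.length + 1) [] [] (by omega)]
  simp

lemma pvSplitColon_head (l : List Char) : (pvSplitColon l).headD [] = l.takeWhile (· != ':') := by
  induction l with
  | nil => simp [pvSplitColon, List.takeWhile]
  | cons c rest ih =>
    simp only [pvSplitColon, List.takeWhile]
    by_cases hc : c = ':'
    · simp [hc]
    · have hne : (c != ':') = true := by simp [hc]
      rw [if_neg hc, hne]
      rcases h : pvSplitColon rest with _ | ⟨p, ps⟩
      · exact absurd h (pvSplitColon_ne_nil rest)
      · rw [h] at ih; simpa using congrArg (c :: ·) ih

lemma pvIsIn_colon (l : List Char) : PySem.Chars.isIn [':'] l = (':' ∈ l : Bool) := by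
  by_cases h : ':' ∈ l
  · obtain ⟨s, t, rfl⟩ := List.append_of_mem h
    have hinf : ([':'] : List Char) <:+: (s ++ ':' :: t) := ⟨s, t, by simp⟩
    simp [h, (PySem.Chars.isIn_iff_infix _ _).2 hinf]
  · simp [h]
    exact (PySem.Chars.isIn_eq_false_iff _ _).2 (fun hinf => h (hinf.mem (by simp)))

-- B's per-line test coincides with A's all()-test on every line
lemma pvCheckAB (line : String) :
    pvCheckA line =
      (((PySem.Str.splitMax? line ":" 1).getD []).length == 2 &&
        PySem.Str.strIsdigit (pvCleanKey (((PySem.Str.splitMax? line ":" 1).getD []).headD ""))) := by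
  unfold pvCheckA
  have hsplit : PySem.Str.split? line ":" = some ((pvSplitColon line.toList).map String.ofList) := by
    simp [PySem.Str.split?, PySem.Chars.split?, pvSplitOn_eq]
  have hmax : PySem.Str.splitMax? line ":" 1 =
      some ((if ':' ∈ line.toList then
        [line.toList.takeWhile (· != ':'), (line.toList.dropWhile (· != ':')).tail]
      else [line.toList]).map String.ofList) := by
    simp [PySem.Str.splitMax?, PySem.Chars.splitMax?, pvSplitMax1_eq]
  rw [hsplit, hmax]
  have hisin : PySem.Str.isIn ":" line = (':' ∈ line.toList : Bool) := by
    have := pvIsIn_colon line.toList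
    simpa [PySem.Str.isIn] using this
  rw [hisin]
  by_cases h : ':' ∈ line.toList
  · have hhead : (pvSplitColon line.toList).head?.getD [] =
        line.toList.takeWhile (· != ':') := by
      have := pvSplitColon_head line.toList
      rcases hsc : pvSplitColon line.toList with _ | ⟨p, ps⟩
      · exact absurd hsc (pvSplitColon_ne_nil _)
      · rw [hsc] at this; simpa using this
    simp [h, hhead]
  · simp [h]

-- one structured iteration of A's build loop equals B's insertion
lemma pvStepA_of_len2 (d : PySem.Dict String String) (line : String)
    (h : ((PySem.Str.splitMax? line ":" 1).getD []).length == 2) :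
    pvStepA d line = PySem.Dict.insert d
      (pvCleanKey (((PySem.Str.splitMax? line ":" 1).getD []).headD ""))
      (pvCleanVal (((PySem.Str.splitMax? line ":" 1).getD []).getD 1 "")) := by
  unfold pvStepA
  simp only [h, if_true]

-- B's single pass, characterised against A's filtered-lines fold
lemma pvLoopB_spec (ls : List String) : ∀ (d : PySem.Dict String String),
    ((ls.filter (fun l => PySem.Str.strip l != "")).all
        (fun line => ((PySem.Str.splitMax? line ":" 1).getD []).length == 2 &&
          PySem.Str.strIsdigit (pvCleanKey (((PySem.Str.splitMax? line ":" 1).getD []).headD ""))) = true →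
      pvLoopB d ls = ((ls.filter (fun l => PySem.Str.strip l != "")).foldl pvStepA d, true)) ∧
    ((ls.filter (fun l => PySem.Str.strip l != "")).all
        (fun line => ((PySem.Str.splitMax? line ":" 1).getD []).length == 2 &&
          PySem.Str.strIsdigit (pvCleanKey (((PySem.Str.splitMax? line ":" 1).getD []).headD ""))) = false →
      (pvLoopB d ls).2 = false) := by
  induction ls with
  | nil => intro d; exact ⟨fun _ => by simp [pvLoopB], fun h => by simp at h⟩
  | cons line rest ih =>
    intro d
    by_cases hb : PySem.Str.strip line == ""
    · have hb' : (PySem.Str.strip line != "") = false := by simpa using hb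
      have hfil : (line :: rest).filter (fun l => PySem.Str.strip l != "") =
          rest.filter (fun l => PySem.Str.strip l != "") := by
        simp [List.filter, hb']
      refine ⟨fun h => ?_, fun h => ?_⟩
      · rw [hfil] at h ⊢
        simp only [pvLoopB, if_pos hb]
        exact (ih d).1 h
      · rw [hfil] at h
        simp only [pvLoopB, if_pos hb]
        exact (ih d).2 h
    · have hb2 : (PySem.Str.strip line == "") = false := by simpa using hb
      have hb' : (PySem.Str.strip line != "") = true := by simp only [bne, hb2, Bool.not_false]
      have hfil : (line :: rest).filter (fun l => PySem.Str.strip l != "") =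
          line :: rest.filter (fun l => PySem.Str.strip l != "") := by
        simp [List.filter, hb']
      refine ⟨fun h => ?_, fun h => ?_⟩
      · rw [hfil] at h ⊢
        simp only [List.all_cons, Bool.and_eq_true] at h
        obtain ⟨⟨hlen, hdig⟩, hrest⟩ := h
        simp only [pvLoopB, hb2, Bool.false_eq_true, if_false, hlen, hdig, Bool.and_self,
          if_true, List.foldl_cons]
        rw [(ih _).1 hrest, pvStepA_of_len2 d line hlen]
      · rw [hfil] at h
        rw [List.all_cons] at h
        by_cases hline : (((PySem.Str.splitMax? line ":" 1).getD []).length == 2 &&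
            PySem.Str.strIsdigit (pvCleanKey (((PySem.Str.splitMax? line ":" 1).getD []).headD ""))) = true
        · have hrest : ((rest.filter (fun l => PySem.Str.strip l != "")).all
              (fun line => ((PySem.Str.splitMax? line ":" 1).getD []).length == 2 &&
                PySem.Str.strIsdigit (pvCleanKey (((PySem.Str.splitMax? line ":" 1).getD []).headD "")))) = false := by
            rw [hline, Bool.true_and] at h; exact h
          simp only [pvLoopB, hb2, Bool.false_eq_true, if_false, hline, if_true]
          exact (ih _).2 hrest
        · have hline' : (((PySem.Str.splitMax? line ":" 1).getD []).length == 2 &&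
              PySem.Str.strIsdigit (pvCleanKey (((PySem.Str.splitMax? line ":" 1).getD []).headD ""))) = false := by
            rwa [Bool.not_eq_true] at hline
          simp only [pvLoopB, hb2, Bool.false_eq_true, if_false, hline']

-- ===== VERDICT (by name: the statement is the Claim_ definition above) =====
theorem parse_text_input_spec : Claim_equal_parse_text_input := by
  intro text kwargs _ _
  unfold Spec_parse_text_input parse_text_input parse_text_input_alt
  have hfun : pvCheckA = (fun line => ((PySem.Str.splitMax? line ":" 1).getD []).length == 2 &&
      PySem.Str.strIsdigit (pvCleanKey (((PySem.Str.splitMax? line ":" 1).getD []).headD ""))) :=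
    funext pvCheckAB
  rw [hfun]
  set raw := (PySem.Str.split? text "\n").getD [] with hraw
  have hspec := pvLoopB_spec raw PySem.Dict.empty
  by_cases h : (raw.filter (fun l => PySem.Str.strip l != "")).all
      (fun line => ((PySem.Str.splitMax? line ":" 1).getD []).length == 2 &&
        PySem.Str.strIsdigit (pvCleanKey (((PySem.Str.splitMax? line ":" 1).getD []).headD ""))) = true
  · rw [if_pos h, hspec.1 h]
  · rw [if_neg h]
    have h2 := hspec.2 (by rwa [Bool.not_eq_true] at h)
    rcases hres : pvLoopB PySem.Dict.empty raw with ⟨d, b⟩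
    rw [hres] at h2
    simp at h2
    subst h2
    rfl
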